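-- pv_equiv track=rewrite | github.com/oaao/advent-of-code | python/2020/16/16.py | get_invalid_tickets_and_values
-- ===== SOURCE A (Python) =====
-- def get_invalid_tickets_and_values(ranges, tickets):
-- 	"""Get an enumerated list of bad tickets and invalid values within each."""
--
-- 	bad_tickets = []
--
-- 	for i, ticket in tickets:
--
-- 		bad_values = tuple(n for n in ticket if not any(lower <= n <= upper for lower, upper in ranges))
--
-- 		if bad_values:
-- 			bad_tickets.append(
-- 				(i, ticket, bad_values)
-- 			)
--
-- 	return bad_tickets
-- ===== SOURCE B (Python) =====
-- def get_invalid_tickets_and_values(ranges, tickets):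
-- 	"""Get an enumerated list of bad tickets and invalid values within each."""
--
-- 	# Preprocess: sort ranges by lower bound and merge overlapping/contained
-- 	# ones once, so each value is checked against a (usually much shorter)
-- 	# merged interval list instead of every raw range.
-- 	merged = []
-- 	for lower, upper in sorted(ranges, key=lambda r: r[0]):
-- 		if merged and lower <= merged[-1][1]:
-- 			merged[-1] = (merged[-1][0], max(merged[-1][1], upper))
-- 		else:
-- 			merged.append((lower, upper))
--
-- 	def invalid_values(ticket):
-- 		return tuple(n for n in ticket if not any(l <= n <= u for l, u in merged))
--
-- 	annotated = [(i, ticket, invalid_values(ticket)) for i, ticket in tickets]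
-- 	return [entry for entry in annotated if entry[2]]
-- ===== Notes on version B (the rewrite author's own statement) =====
-- stated objective: faster
-- what changed: B sorts the ranges by lower bound and merges overlapping ranges once up front, then tests each ticket value against the merged interval list (and builds the result by map+filter) instead of scanning every raw range per value.
import Mathlib
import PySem

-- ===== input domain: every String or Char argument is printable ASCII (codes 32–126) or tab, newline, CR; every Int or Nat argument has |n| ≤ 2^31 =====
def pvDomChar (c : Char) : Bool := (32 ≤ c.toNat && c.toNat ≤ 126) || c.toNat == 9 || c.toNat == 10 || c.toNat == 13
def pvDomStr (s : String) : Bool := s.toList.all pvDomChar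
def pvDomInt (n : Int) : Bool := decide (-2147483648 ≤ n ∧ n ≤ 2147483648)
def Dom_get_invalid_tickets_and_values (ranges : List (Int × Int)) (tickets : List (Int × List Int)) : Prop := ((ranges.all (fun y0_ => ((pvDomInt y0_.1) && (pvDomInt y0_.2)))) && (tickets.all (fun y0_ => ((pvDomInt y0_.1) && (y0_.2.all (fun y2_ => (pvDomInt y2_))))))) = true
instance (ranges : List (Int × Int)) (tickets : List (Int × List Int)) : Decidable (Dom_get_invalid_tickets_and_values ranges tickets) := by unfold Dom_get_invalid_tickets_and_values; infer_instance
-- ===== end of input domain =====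

-- B merges the sorted ranges once and checks each value against the merged intervals (alternative algorithm, same result).


-- ===== PORT A =====
def get_invalid_tickets_and_values (ranges : List (Int × Int)) (tickets : List (Int × List Int)) : List (Int × List Int × List Int) :=
  tickets.foldl (fun bad_tickets t =>
    let bad_values := t.2.filter (fun n =>
      ! ranges.any (fun r => decide (r.1 ≤ n) && decide (n ≤ r.2)))
    if bad_values.isEmpty then bad_tickets
    else bad_tickets ++ [(t.1, t.2, bad_values)]) []

-- ===== PORT B =====
-- Source B's merge loop: 'merged' kept head-first (Python's merged[-1] is the head), reversed at the end
def pvMergeLoop : List (Int × Int) → List (Int × Int) → List (Int × Int)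
  | acc, [] => acc.reverse
  | acc, (l, u) :: rest =>
    match acc with
    | (L, U) :: t =>
      if l ≤ U then pvMergeLoop ((L, max U u) :: t) rest
      else pvMergeLoop ((l, u) :: (L, U) :: t) rest
    | [] => pvMergeLoop [(l, u)] rest

def get_invalid_tickets_and_values_alt (ranges : List (Int × Int)) (tickets : List (Int × List Int)) : List (Int × List Int × List Int) :=
  let merged := pvMergeLoop [] (PySem.List.sorted ranges (fun r => r.1) false)
  let invalid_values := fun (ticket : List Int) =>
    ticket.filter (fun n => ! merged.any (fun r => decide (r.1 ≤ n) && decide (n ≤ r.2)))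
  let annotated := tickets.map (fun t => (t.1, t.2, invalid_values t.2))
  annotated.filter (fun e => ! e.2.2.isEmpty)

-- ===== PRECONDITION & SPEC =====
def Spec_get_invalid_tickets_and_values (ranges : List (Int × Int)) (tickets : List (Int × List Int)) (out : List (Int × List Int × List Int)) : Prop := out = get_invalid_tickets_and_values_alt ranges tickets
instance (ranges : List (Int × Int)) (tickets : List (Int × List Int)) (out : List (Int × List Int × List Int)) : Decidable (Spec_get_invalid_tickets_and_values ranges tickets out) := by unfold Spec_get_invalid_tickets_and_values; infer_instance

-- ===== CLAIM (what is proved, stated in full; the proofs are below) =====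
def Claim_equal_get_invalid_tickets_and_values : Prop := ∀ (ranges : List (Int × Int)) (tickets : List (Int × List Int)), Dom_get_invalid_tickets_and_values ranges tickets → Spec_get_invalid_tickets_and_values ranges tickets (get_invalid_tickets_and_values ranges tickets)

-- ===== LEMMAS AND PROOFS =====

-- 'n is covered by some interval of rs'
def pvCov (rs : List (Int × Int)) (n : Int) : Bool :=
  rs.any (fun r => decide (r.1 ≤ n) && decide (n ≤ r.2))

theorem pvCov_cons (p : Int × Int) (rs : List (Int × Int)) (n : Int) :
    pvCov (p :: rs) n = ((decide (p.1 ≤ n) && decide (n ≤ p.2)) || pvCov rs n) := by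
  simp [pvCov]

-- the merge loop preserves coverage, provided the incoming lowers are sorted and ≥ the head lower of acc
theorem pvMergeLoop_cov (rs : List (Int × Int)) (acc : List (Int × Int)) (n : Int)
    (hs : rs.Pairwise (fun a b => a.1 ≤ b.1))
    (hh : ∀ p ∈ rs, ∀ q, acc.head? = some q → q.1 ≤ p.1) :
    pvCov (pvMergeLoop acc rs) n = (pvCov acc n || pvCov rs n) := by
  induction rs generalizing acc with
  | nil => simp [pvMergeLoop, pvCov]
  | cons hd tl ih =>
    obtain ⟨l, u⟩ := hd
    rw [List.pairwise_cons] at hs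
    cases acc with
    | nil =>
      rw [pvMergeLoop, ih [(l, u)] hs.2 (by
        intro p hp q hq
        simp at hq
        subst hq
        exact hs.1 p hp)]
      simp [pvCov]
    | cons a t =>
      obtain ⟨L, U⟩ := a
      have hL : L ≤ l := hh (l, u) (by simp) (L, U) rfl
      rw [pvMergeLoop]
      by_cases hlu : l ≤ U
      · simp only [if_pos hlu]
        rw [ih ((L, max U u) :: t) hs.2 (by
          intro p hp q hq
          simp at hq
          subst hq
          exact hh p (by simp [hp]) (L, U) rfl)]
        have hpt : (decide (L ≤ n) && decide (n ≤ max U u))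
            = ((decide (L ≤ n) && decide (n ≤ U)) || (decide (l ≤ n) && decide (n ≤ u))) := by
          rw [Bool.eq_iff_iff]
          simp only [Bool.or_eq_true, Bool.and_eq_true, decide_eq_true_eq]
          omega
        simp only [pvCov_cons, hpt]
        cases decide (L ≤ n) && decide (n ≤ U) <;>
          cases decide (l ≤ n) && decide (n ≤ u) <;>
          cases pvCov t n <;> cases pvCov tl n <;> rfl
      · simp only [if_neg hlu]
        rw [ih ((l, u) :: (L, U) :: t) hs.2 (by
          intro p hp q hq
          simp at hq
          subst hq
          exact hs.1 p hp)]
        simp only [pvCov_cons]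
        cases decide (L ≤ n) && decide (n ≤ U) <;>
          cases decide (l ≤ n) && decide (n ≤ u) <;>
          cases pvCov t n <;> cases pvCov tl n <;> rfl

theorem pvCov_sorted (rs : List (Int × Int)) (n : Int) :
    pvCov (PySem.List.sorted rs (fun r => r.1) false) n = pvCov rs n := by
  rw [Bool.eq_iff_iff]
  simp only [pvCov, List.any_eq_true]
  constructor
  · rintro ⟨r, hr, h⟩
    exact ⟨r, (PySem.List.mem_sorted _ _ _ _).1 hr, h⟩
  · rintro ⟨r, hr, h⟩
    exact ⟨r, (PySem.List.mem_sorted _ _ _ _).2 hr, h⟩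

theorem pvMerged_cov (ranges : List (Int × Int)) (n : Int) :
    pvCov (pvMergeLoop [] (PySem.List.sorted ranges (fun r => r.1) false)) n = pvCov ranges n := by
  rw [pvMergeLoop_cov _ [] n (PySem.List.sorted_pairwise ranges (fun r => r.1))
      (by intro p _ q hq; simp at hq)]
  have h0 : pvCov [] n = false := rfl
  rw [h0, Bool.false_or, pvCov_sorted]

-- ===== VERDICT (by name: the statement is the Claim_ definition above) =====
theorem get_invalid_tickets_and_values_spec : Claim_equal_get_invalid_tickets_and_values := by
  intro ranges tickets _
  show get_invalid_tickets_and_values ranges tickets = get_invalid_tickets_and_values_alt ranges tickets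
  unfold get_invalid_tickets_and_values get_invalid_tickets_and_values_alt
  have hf : (fun n =>
      ! (pvMergeLoop [] (PySem.List.sorted ranges (fun r => r.1) false)).any
        (fun r => decide (r.1 ≤ n) && decide (n ≤ r.2)))
      = (fun n => ! ranges.any (fun r => decide (r.1 ≤ n) && decide (n ≤ r.2))) := by
    funext n
    have := pvMerged_cov ranges n
    simp only [pvCov] at this
    rw [this]
  simp only [hf]
  -- A's append-loop is filter-then-map; B's map-then-filter is the same list
  rw [show (fun (bad_tickets : List (Int × List Int × List Int)) (t : Int × List Int) =>
      let bad_values := t.2.filter (fun n => ! ranges.any (fun r => decide (r.1 ≤ n) && decide (n ≤ r.2)))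
      if bad_values.isEmpty then bad_tickets else bad_tickets ++ [(t.1, t.2, bad_values)])
    = (fun bad_tickets t =>
      if (! (t.2.filter (fun n => ! ranges.any (fun r => decide (r.1 ≤ n) && decide (n ≤ r.2)))).isEmpty) = true
      then bad_tickets ++ [(t.1, t.2, t.2.filter (fun n => ! ranges.any (fun r => decide (r.1 ≤ n) && decide (n ≤ r.2))))]
      else bad_tickets) from by
      funext acc t
      by_cases h : (t.2.filter (fun n => ! ranges.any (fun r => decide (r.1 ≤ n) && decide (n ≤ r.2)))).isEmpty <;> simp [h]]
  rw [PySem.List.foldl_append_if]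
  rw [List.filter_map]
  rfl
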